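-- pv_equiv track=rewrite | github.com/microsoft/nnscaler | nnscaler/runtime/gnorm.py | _check_no_intersection
-- ===== SOURCE A (Python) =====
-- def _check_no_intersection(ranks_set):
--     # ranks_set: set of tuple
--     # check intersection between any two tuples
--     ranks = set()
--     for r in ranks_set:
--         old_len = len(ranks)
--         ranks.update(r)
--         if len(ranks)  - old_len != len(r):
--             return False
--     return True
-- ===== SOURCE B (Python) =====
-- def _check_no_intersection(ranks_set):
--     # flatten everything, then one global distinctness test
--     flat = [x for r in ranks_set for x in r]
--     return len(set(flat)) == len(flat)
-- ===== Notes on version B (the rewrite author's own statement) =====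
-- stated objective: simpler
-- what changed: Replaces A's incremental grow-the-set loop with per-tuple delta checks and early return by a two-phase collect-then-compare: flatten all tuples into one list and compare its length with its set's size once.
import Mathlib
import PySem

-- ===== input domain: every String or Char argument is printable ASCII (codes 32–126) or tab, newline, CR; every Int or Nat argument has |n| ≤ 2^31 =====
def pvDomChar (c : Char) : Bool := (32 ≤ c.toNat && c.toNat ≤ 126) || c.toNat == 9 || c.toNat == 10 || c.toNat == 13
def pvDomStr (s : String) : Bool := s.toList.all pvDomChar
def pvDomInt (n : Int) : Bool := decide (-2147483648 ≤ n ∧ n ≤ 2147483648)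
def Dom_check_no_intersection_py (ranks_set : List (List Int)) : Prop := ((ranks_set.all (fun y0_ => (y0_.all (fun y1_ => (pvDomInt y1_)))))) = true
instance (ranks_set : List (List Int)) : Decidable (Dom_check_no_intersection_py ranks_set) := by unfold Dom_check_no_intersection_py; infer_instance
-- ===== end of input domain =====

-- B replaces A's incremental set-growing loop with early return by flatten-all then a single distinctness test (objective: simpler).


-- ===== PORT A =====
-- loop of A: grow the set tuple by tuple, early-return False when the delta is short
def checkNoIntLoop (ranks : PySem.Set Int) : List (List Int) → Bool
  | [] => true
  | r :: rest =>
    let old_len := PySem.Set.len ranks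
    let ranks' := PySem.Set.update ranks r
    if ((PySem.Set.len ranks' : Int) - (old_len : Int)) ≠ (r.length : Int) then false
    else checkNoIntLoop ranks' rest

def check_no_intersection_py (ranks_set : List (List Int)) : Bool :=
  checkNoIntLoop PySem.Set.empty ranks_set

-- ===== PORT B =====
def check_no_intersection_py_alt (ranks_set : List (List Int)) : Bool :=
  let flat := ranks_set.flatMap (fun r => r)
  PySem.Set.len (PySem.Set.ofList flat) == flat.length

-- ===== PRECONDITION & SPEC =====
def Spec_check_no_intersection_py (ranks_set : List (List Int)) (out : Bool) : Prop := out = check_no_intersection_py_alt ranks_set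
instance (ranks_set : List (List Int)) (out : Bool) : Decidable (Spec_check_no_intersection_py ranks_set out) := by unfold Spec_check_no_intersection_py; infer_instance

-- ===== CLAIM (what is proved, stated in full; the proofs are below) =====
def Claim_equal_check_no_intersection_py : Prop := ∀ (ranks_set : List (List Int)), Dom_check_no_intersection_py ranks_set → Spec_check_no_intersection_py ranks_set (check_no_intersection_py ranks_set)

-- ===== LEMMAS AND PROOFS =====

-- ===== VERDICT (by name: the statement is the Claim_ definition above) =====
lemma len_add_le {s : PySem.Set Int} {x : Int} :
    (PySem.Set.add s x).length ≤ s.length + 1 := by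
  unfold PySem.Set.add
  split <;> simp

lemma le_len_add {s : PySem.Set Int} {x : Int} :
    s.length ≤ (PySem.Set.add s x).length := by
  unfold PySem.Set.add
  split <;> simp

lemma len_update_le (r : List Int) (s : PySem.Set Int) :
    (PySem.Set.update s r).length ≤ s.length + r.length := by
  induction r generalizing s with
  | nil => simp [PySem.Set.update]
  | cons x xs ih =>
    have h1 := ih (PySem.Set.add s x)
    have h2 := len_add_le (s := s) (x := x)
    simpa [PySem.Set.update, List.foldl_cons] using h1.trans (by omega)

lemma le_len_update (r : List Int) (s : PySem.Set Int) :
    s.length ≤ (PySem.Set.update s r).length := by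
  induction r generalizing s with
  | nil => simp [PySem.Set.update]
  | cons x xs ih =>
    have h1 := ih (PySem.Set.add s x)
    have h2 := le_len_add (s := s) (x := x)
    simpa [PySem.Set.update, List.foldl_cons] using h2.trans h1

lemma update_append (s : PySem.Set Int) (a b : List Int) :
    PySem.Set.update s (a ++ b) = PySem.Set.update (PySem.Set.update s a) b := by
  simp [PySem.Set.update, List.foldl_append]

lemma loop_eq_len (l : List (List Int)) (s : PySem.Set Int) :
    checkNoIntLoop s l =
      decide ((PySem.Set.update s (l.flatMap (fun r => r))).length
        = s.length + (l.flatMap (fun r => r)).length) := by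
  induction l generalizing s with
  | nil => simp [checkNoIntLoop, PySem.Set.update]
  | cons r rest ih =>
    have hle := len_update_le r s
    have hge := le_len_update r s
    have happ := update_append s r (rest.flatMap (fun r => r))
    rw [checkNoIntLoop]
    simp only [List.flatMap_cons, happ, PySem.Set.len]
    split
    · -- delta ≠ len r : the update lost an element, total count can never be reached
      rename_i hne
      have hlt : (PySem.Set.update s r).length < s.length + r.length := by omega
      have h1 := len_update_le (rest.flatMap (fun r => r)) (PySem.Set.update s r)
      simp only [List.length_append]
      symm
      simp only [decide_eq_false_iff_not]
      omega
    · rename_i heq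
      have hlen : (PySem.Set.update s r).length = s.length + r.length := by omega
      rw [ih]
      simp [List.length_append, hlen]
      constructor <;> intro h <;> omega

theorem check_no_intersection_py_spec : Claim_equal_check_no_intersection_py := by
  intro ranks_set _
  unfold Spec_check_no_intersection_py check_no_intersection_py check_no_intersection_py_alt
  rw [loop_eq_len]
  show _ = ((PySem.Set.ofList (ranks_set.flatMap (fun r => r))).len
      == ((ranks_set.flatMap (fun r => r)).length : Int))
  rw [show PySem.Set.ofList (ranks_set.flatMap (fun r => r))
      = PySem.Set.update PySem.Set.empty (ranks_set.flatMap (fun r => r)) from rfl]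
  simp only [PySem.Set.empty, PySem.Set.len]
  rw [show (((PySem.Set.update ([] : List Int) (ranks_set.flatMap (fun r => r))).length : Int)
        == ((ranks_set.flatMap (fun r => r)).length : Int))
      = decide (((PySem.Set.update ([] : List Int) (ranks_set.flatMap (fun r => r))).length : Int)
        = ((ranks_set.flatMap (fun r => r)).length : Int)) from rfl,
    decide_eq_decide, Int.natCast_inj]
  simp
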